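-- pv_equiv track=rewrite | github.com/aquastripe/problem-solving | codeforces/2106 Div3/C.py | solve
-- ===== SOURCE A (Python) =====
-- def solve(a, b, n, k):
--     count_missing = 0
--     sum_a_b = -1
--     min_a = 10 ** 10
--     max_a = -1
--     for i in range(n):
--         if b[i] == -1:
--             count_missing += 1
--             min_a = min(min_a, a[i])
--             max_a = max(max_a, a[i])
--         else:
--             # sum_a_b is not updated
--             if sum_a_b == -1:
--                 sum_a_b = a[i] + b[i]
--             # is updated
--             else:
--                 if sum_a_b != a[i] + b[i]:
--                     return 0
--
--     if max_a == -1: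
--         return 1
--
--     max_b = k - min_a
--     min_b = k - max_a
--
--     if 0 <= max_b <= k and 0 <= min_b <= k:
--         if count_missing == n:
--             return k - max_a + min_a + 1
--         else:
--             if 0 <= (sum_a_b - max_a) and (sum_a_b - min_a) <= k:
--                 return 1
--             else:
--                 return 0
--     else:
--         return 0
-- ===== SOURCE B (Python) =====
-- def solve(a, b, n, k):
--     # The feasible values of the common sum s form an integer interval:
--     # a known pair pins s = a[i] + b[i]; a missing position needs a[i] to be a
--     # valid value (0 <= a[i] <= k) and allows any s in [a[i], a[i] + k].
--     # Intersect all these intervals; the answer is the interval's length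
--     # (1 when there are no positions at all).
--     lo = None
--     hi = None
--     for i in range(n):
--         ai = a[i]
--         bi = b[i]
--         if bi == -1:
--             if ai < 0 or ai > k:
--                 return 0
--             l, h = ai, ai + k
--         else:
--             l, h = ai + bi, ai + bi
--         lo = l if lo is None else max(lo, l)
--         hi = h if hi is None else min(hi, h)
--     if lo is None:
--         return 1
--     return max(hi - lo + 1, 0)
-- ===== Notes on version B (the rewrite author's own statement) =====
-- stated objective: alternative
-- what changed: A runs one loop with four running accumulators (missing count/min/max, a sum sentinel with early return) followed by a block of boundary checks; B instead views the feasible common sums as an integer interval, intersects one interval per position (a point for a known pair, [a[i], a[i]+k] for a missing one, which must also hold a valid value 0<=a[i]<=k), and returns the interval's length.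
-- intended difference: On inputs where a genuine pair sum equal to -1 collides with A's 'no sum seen yet' sentinel (a pair sum of -1 preceding the consistent non-(-1) sums, or all missing values <= -1 so A's max accumulator stays at its -1 seed), A overlooks the inconsistency and returns 1, while B returns 0, which is intended because those boards admit no common sum / contain invalid values. — e.g. on solve([-2, 1, 0], [1, 1, -1], 3, 2): A returns 1, B returns 0
-- outside the precondition, e.g. on solve([41, -1, 8], [93, -3, 8], 9, 7227): A returns 0, B raises IndexError
import Mathlib
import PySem

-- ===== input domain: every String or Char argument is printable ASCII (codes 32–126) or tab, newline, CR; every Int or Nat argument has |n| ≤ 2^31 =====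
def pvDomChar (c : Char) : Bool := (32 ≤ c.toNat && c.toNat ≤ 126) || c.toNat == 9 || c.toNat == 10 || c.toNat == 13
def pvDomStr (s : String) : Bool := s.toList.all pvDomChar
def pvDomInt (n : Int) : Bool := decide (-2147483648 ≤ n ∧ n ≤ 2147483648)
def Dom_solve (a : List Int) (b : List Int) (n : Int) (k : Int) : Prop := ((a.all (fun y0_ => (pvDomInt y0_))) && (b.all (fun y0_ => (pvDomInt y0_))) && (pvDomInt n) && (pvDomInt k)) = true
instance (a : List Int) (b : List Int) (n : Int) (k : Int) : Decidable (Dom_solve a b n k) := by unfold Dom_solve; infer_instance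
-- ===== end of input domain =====

-- B replaces A's four-accumulator loop and boundary-check block by an interval
-- intersection over the feasible common sums (objective: alternative algorithm);
-- D_solve states the inputs (A's -1-sentinel collisions) where B intentionally
-- returns 0 while A returns 1.

-- ===== PORT A =====
def solveFinishA (n k cm s mn mx : Int) : Int :=
  if mx = -1 then 1
  else
    let max_b := k - mn
    let min_b := k - mx
    if 0 ≤ max_b ∧ max_b ≤ k ∧ 0 ≤ min_b ∧ min_b ≤ k then
      if cm = n then k - mx + mn + 1
      else if 0 ≤ s - mx ∧ s - mn ≤ k then 1 else 0
    else 0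

def solveLoopA (a b : List Int) (n k : Int) : List Int → Int → Int → Int → Int → Int
  | [], cm, s, mn, mx => solveFinishA n k cm s mn mx
  | i :: rest, cm, s, mn, mx =>
    match PySem.List.pyGet? b i, PySem.List.pyGet? a i with
    | some bi, some ai =>
      if bi = -1 then solveLoopA a b n k rest (cm + 1) s (min mn ai) (max mx ai)
      else if s = -1 then solveLoopA a b n k rest cm (ai + bi) mn mx
      else if s ≠ ai + bi then 0
      else solveLoopA a b n k rest cm s mn mx
    | _, _ => 0   -- IndexError in Python: excluded by Pre_solve

def solve (a : List Int) (b : List Int) (n : Int) (k : Int) : Int :=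
  solveLoopA a b n k (PySem.List.pyRange 0 n 1) 0 (-1) (10 ^ 10) (-1)

-- ===== PORT B =====
-- Source B: intersect one interval of feasible common sums per position
-- (lo/hi are Python's two None-initialised variables; early return 0 on a
-- missing position whose value is not in [0, k]).
def solveLoopB (a b : List Int) (k : Int) : List Int → Option Int → Option Int → Int
  | [], lo, hi =>
    match lo, hi with
    | some lo', some hi' => max (hi' - lo' + 1) 0
    | _, _ => 1
  | i :: rest, lo, hi =>
    match PySem.List.pyGet? a i, PySem.List.pyGet? b i with
    | some ai, some bi =>
      if bi = -1 then
        if ai < 0 ∨ k < ai then 0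
        else solveLoopB a b k rest
          (some (match lo with | none => ai | some x => max x ai))
          (some (match hi with | none => ai + k | some x => min x (ai + k)))
      else solveLoopB a b k rest
          (some (match lo with | none => ai + bi | some x => max x (ai + bi)))
          (some (match hi with | none => ai + bi | some x => min x (ai + bi)))
    | _, _ => 0   -- IndexError in Python: excluded by Pre_solve

def solve_alt (a : List Int) (b : List Int) (n : Int) (k : Int) : Int :=
  solveLoopB a b k (PySem.List.pyRange 0 n 1) none none

-- ===== PRECONDITION & SPEC =====
-- Pre_solve excludes n beyond the list lengths, where indexing raises
-- IndexError; A may still return 0 there when an early sum mismatch precedes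
-- the first out-of-range index, while B (which scans all positions) raises.
def Pre_solve (a : List Int) (b : List Int) (n : Int) (k : Int) : Prop :=
  n ≤ (a.length : Int) ∧ n ≤ (b.length : Int)
instance (a : List Int) (b : List Int) (n : Int) (k : Int) : Decidable (Pre_solve a b n k) := by
  unfold Pre_solve; infer_instance

def pvWitness_solve : List Int × List Int × Int × Int := ([2, 1, 3], [1, -1, 0], 3, 3)

-- On inputs where a genuine pair sum equal to -1 collides with A's
-- "no sum seen yet" sentinel (a pair sum of -1 preceding the consistent
-- non-(-1) sums, or all missing values ≤ -1 so A's max accumulator stays at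
-- its -1 seed), A overlooks the inconsistency and returns 1, while B returns
-- 0, which is intended: those boards admit no common sum / contain invalid values.
def D_solve (a : List Int) (b : List Int) (n : Int) (k : Int) : Prop :=
  let P := (a.zip b).take n.toNat
  let S := P.filterMap fun p => if p.2 = -1 then none else some (p.1 + p.2)
  let M := P.filterMap fun p => if p.2 = -1 then some p.1 else none
  let T := S.dropWhile (· == -1)
  ((M ≠ [] ∧ ∀ x ∈ M, x ≤ -1) ∨
    (S.headI = -1 ∧ T ≠ [] ∧ ∀ x ∈ M, 0 ≤ x ∧ x ≤ k ∧ x ≤ T.headI ∧ T.headI ≤ x + k)) ∧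
  ∀ v ∈ T, v = T.headI
instance (a : List Int) (b : List Int) (n : Int) (k : Int) : Decidable (D_solve a b n k) := by
  unfold D_solve; infer_instance

def Spec_solve (a : List Int) (b : List Int) (n : Int) (k : Int) (out : Int) : Prop :=
  ¬ D_solve a b n k → out = solve_alt a b n k
instance (a : List Int) (b : List Int) (n : Int) (k : Int) (out : Int) : Decidable (Spec_solve a b n k out) := by
  unfold Spec_solve; infer_instance

def pvDiffWitness_solve : List Int × List Int × Int × Int := ([-2, 1, 0], [1, 1, -1], 3, 2)
def pvDiffWitnessOut_solve : Int × Int := (1, 0)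

-- ===== CLAIM =====
def Claim_unchanged_solve : Prop := ∀ (a : List Int) (b : List Int) (n : Int) (k : Int), Dom_solve a b n k → Pre_solve a b n k → Spec_solve a b n k (solve a b n k)
def Claim_changed_solve : Prop := Dom_solve (pvDiffWitness_solve.1) (pvDiffWitness_solve.2.1) (pvDiffWitness_solve.2.2.1) (pvDiffWitness_solve.2.2.2) ∧ Pre_solve (pvDiffWitness_solve.1) (pvDiffWitness_solve.2.1) (pvDiffWitness_solve.2.2.1) (pvDiffWitness_solve.2.2.2) ∧ D_solve (pvDiffWitness_solve.1) (pvDiffWitness_solve.2.1) (pvDiffWitness_solve.2.2.1) (pvDiffWitness_solve.2.2.2) ∧ solve (pvDiffWitness_solve.1) (pvDiffWitness_solve.2.1) (pvDiffWitness_solve.2.2.1) (pvDiffWitness_solve.2.2.2) = pvDiffWitnessOut_solve.1 ∧ solve_alt (pvDiffWitness_solve.1) (pvDiffWitness_solve.2.1) (pvDiffWitness_solve.2.2.1) (pvDiffWitness_solve.2.2.2) = pvDiffWitnessOut_solve.2 ∧ pvDiffWitnessOut_solve.1 ≠ pvDiffWitnessOut_solve.2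
def Claim_exact_solve : Prop := ∀ (a : List Int) (b : List Int) (n : Int) (k : Int), Dom_solve a b n k → Pre_solve a b n k → D_solve a b n k → solve a b n k ≠ solve_alt a b n k

-- ===== LEMMAS AND PROOFS =====

-- proof-side views of the inputs: the missing values and known pair sums
def solveMissF (a b : List Int) (i : Int) : Option Int :=
  if PySem.List.pyGetD b i 0 = -1 then some (PySem.List.pyGetD a i 0) else none
def solveSumF (a b : List Int) (i : Int) : Option Int :=
  if PySem.List.pyGetD b i 0 ≠ -1 then some (PySem.List.pyGetD a i 0 + PySem.List.pyGetD b i 0) else none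
def missVals (a b : List Int) (n : Int) : List Int :=
  (PySem.List.pyRange 0 n 1).filterMap (solveMissF a b)
def knownSums (a b : List Int) (n : Int) : List Int :=
  (PySem.List.pyRange 0 n 1).filterMap (solveSumF a b)

-- D_solve's condition, abstracted over the two extracted lists
def DcoreP (S M : List Int) (k : Int) : Prop :=
  let T := S.dropWhile (· == -1)
  ((M ≠ [] ∧ ∀ x ∈ M, x ≤ -1) ∨
    (S.headI = -1 ∧ T ≠ [] ∧ ∀ x ∈ M, 0 ≤ x ∧ x ≤ k ∧ x ≤ T.headI ∧ T.headI ≤ x + k)) ∧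
  ∀ v ∈ T, v = T.headI

-- abstract version of A's sum-consistency accumulator
def scanS (s : Int) : List Int → Option Int
  | [] => some s
  | v :: r => if s = -1 then scanS v r else if s ≠ v then none else scanS s r

theorem scanS_neg (s : Int) (hs : s ≠ -1) (l : List Int) :
    scanS s l = if l.any (fun v => v ≠ s) then none else some s := by
  induction l with
  | nil => simp [scanS]
  | cons v r ih =>
    simp only [scanS, if_neg hs, List.any_cons]
    by_cases hv : s = v
    · subst hv; rw [ih]; simp
    · rw [if_pos hv]
      have hv' : v ≠ s := fun h => hv h.symm
      simp [hv']

theorem scanS_start (l : List Int) :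
    scanS (-1) l = match l.dropWhile (fun v => v == -1) with
      | [] => some (-1)
      | t :: r => if (t :: r).any (fun v => v ≠ t) then none else some t := by
  induction l with
  | nil => simp [scanS, List.dropWhile]
  | cons v r ih =>
    by_cases hv : v = -1
    · subst hv
      simpa [scanS, List.dropWhile] using ih
    · have hdw : (v :: r).dropWhile (fun x => x == -1) = v :: r := by
        simp [List.dropWhile, show (v == (-1:Int)) = false from by simpa using hv]
      rw [show scanS (-1) (v :: r) = scanS v r from by simp [scanS], scanS_neg v hv r, hdw]
      simp

theorem solveLoopA_eq (a b : List Int) (n k : Int) (idxs : List Int)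
    (h : ∀ i ∈ idxs, (PySem.List.pyGet? b i).isSome ∧ (PySem.List.pyGet? a i).isSome) :
    ∀ cm s mn mx,
    solveLoopA a b n k idxs cm s mn mx =
      match scanS s (idxs.filterMap (solveSumF a b)) with
      | none => 0
      | some s' =>
          let ms := idxs.filterMap (solveMissF a b)
          solveFinishA n k (cm + (ms.length : Int)) s' (ms.foldl min mn) (ms.foldl max mx) := by
  induction idxs with
  | nil => intro cm s mn mx; simp [solveLoopA, scanS, List.filterMap]
  | cons i rest ih =>
    intro cm s mn mx
    obtain ⟨hb, ha⟩ := h i (List.mem_cons_self ..)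
    obtain ⟨bi, hbi⟩ := Option.isSome_iff_exists.mp hb
    obtain ⟨ai, hai⟩ := Option.isSome_iff_exists.mp ha
    have hrest : ∀ i ∈ rest, (PySem.List.pyGet? b i).isSome ∧ (PySem.List.pyGet? a i).isSome :=
      fun j hj => h j (List.mem_cons_of_mem _ hj)
    have hbd : PySem.List.pyGetD b i 0 = bi := by simp [PySem.List.pyGetD, hbi]
    have had : PySem.List.pyGetD a i 0 = ai := by simp [PySem.List.pyGetD, hai]
    by_cases hmiss : bi = -1
    · have : solveMissF a b i = some ai := by simp [solveMissF, hbd, had, hmiss]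
      have hs : solveSumF a b i = none := by simp [solveSumF, hbd, hmiss]
      simp only [solveLoopA, hbi, hai, if_pos hmiss, List.filterMap_cons, this, hs, ih hrest]
      cases scanS s (rest.filterMap (solveSumF a b)) with
      | none => rfl
      | some s' =>
        simp only [List.length_cons, List.foldl_cons]
        congr 1
        push_cast
        ring
    · have hm : solveMissF a b i = none := by simp [solveMissF, hbd, hmiss]
      have hs : solveSumF a b i = some (ai + bi) := by simp [solveSumF, hbd, had, hmiss]
      simp only [solveLoopA, hbi, hai, if_neg hmiss, List.filterMap_cons, hm, hs]
      by_cases h1 : s = -1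
      · subst h1
        rw [if_pos rfl, ih hrest]
        simp [scanS]
      · rw [if_neg h1]
        by_cases h2 : s = ai + bi
        · rw [if_neg (by omega), ih hrest]
          simp [scanS, h2]
        · rw [if_pos (by omega)]
          simp [scanS, if_neg h1, h2]

theorem pyGet?_isSome_of_lt {xs : List Int} {i : Int} (h0 : 0 ≤ i) (h1 : i < (xs.length : Int)) :
    (PySem.List.pyGet? xs i).isSome := by
  have hi : i = (i.toNat : Int) := by omega
  rw [hi, PySem.List.pyGet?_natCast]
  have : i.toNat < xs.length := by omega
  simp [this]

-- fold toolkit (facts about min/max folds the interval port is reasoned with)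
theorem foldl_max_seed (l : List Int) (c x : Int) :
    l.foldl max (max c x) = max (l.foldl max c) x := by
  induction l generalizing c with
  | nil => rfl
  | cons v r ih =>
    simp only [List.foldl_cons]
    rw [show max (max c x) v = max (max c v) x by omega, ih]

theorem foldl_min_seed (l : List Int) (c x : Int) :
    l.foldl min (min c x) = min (l.foldl min c) x := by
  induction l generalizing c with
  | nil => rfl
  | cons v r ih =>
    simp only [List.foldl_cons]
    rw [show min (min c x) v = min (min c v) x by omega, ih]

theorem foldl_max_absorb (l : List Int) {c x : Int} (h : c ≤ x) :
    l.foldl max x = max (l.foldl max c) x := by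
  rw [show x = max c x by omega, foldl_max_seed]
  omega

theorem foldl_min_absorb (l : List Int) {c x : Int} (h : x ≤ c) :
    l.foldl min x = min (l.foldl min c) x := by
  rw [show x = min c x by omega, foldl_min_seed]
  omega

theorem foldl_max_le (l : List Int) {c d : Int} (hc : c ≤ d) (h : ∀ x ∈ l, x ≤ d) :
    l.foldl max c ≤ d := by
  induction l generalizing c with
  | nil => exact hc
  | cons v r ih =>
    exact ih (by have := h v (List.mem_cons_self ..); omega)
      (fun x hx => h x (List.mem_cons_of_mem _ hx))

theorem le_foldl_min (l : List Int) {c d : Int} (hc : d ≤ c) (h : ∀ x ∈ l, d ≤ x) :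
    d ≤ l.foldl min c := by
  induction l generalizing c with
  | nil => exact hc
  | cons v r ih =>
    exact ih (by have := h v (List.mem_cons_self ..); omega)
      (fun x hx => h x (List.mem_cons_of_mem _ hx))

theorem foldl_max_const (l : List Int) (c t : Int) (h : ∀ x ∈ l, x = t) (hl : l ≠ []) :
    l.foldl max c = max c t := by
  cases l with
  | nil => exact absurd rfl hl
  | cons v r =>
    have hv : v = t := h v (List.mem_cons_self ..)
    subst hv
    simp only [List.foldl_cons]
    rw [show max c v = max v c by omega, foldl_max_seed]
    have : List.foldl max v r = v := by
      have h1 := (PySem.List.le_foldl_max r v).1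
      have h2 := foldl_max_le r (le_refl v) (fun x hx => le_of_eq (h x (List.mem_cons_of_mem _ hx)))
      omega
    omega

theorem foldl_min_const (l : List Int) (c t : Int) (h : ∀ x ∈ l, x = t) (hl : l ≠ []) :
    l.foldl min c = min c t := by
  cases l with
  | nil => exact absurd rfl hl
  | cons v r =>
    have hv : v = t := h v (List.mem_cons_self ..)
    subst hv
    simp only [List.foldl_cons]
    rw [show min c v = min v c by omega, foldl_min_seed]
    have : List.foldl min v r = v := by
      have h1 := (PySem.List.foldl_min_le r v).1
      have h2 := le_foldl_min r (le_refl v) (fun x hx => ge_of_eq (h x (List.mem_cons_of_mem _ hx)))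
      omega
    omega

theorem foldl_shift_min (l : List Int) (c k : Int) :
    l.foldl (fun h x => min h (x + k)) c = (l.foldl min (c - k)) + k := by
  induction l generalizing c with
  | nil => simp
  | cons v r ih =>
    simp only [List.foldl_cons]
    rw [ih, show min c (v + k) - k = min (c - k) v from by omega]

-- the two interval folds B's result is phrased with
def lowFold (S M : List Int) (c : Int) : Int := M.foldl max (S.foldl max c)
def highFold (k : Int) (S M : List Int) (c : Int) : Int :=
  M.foldl (fun h x => min h (x + k)) (S.foldl min c)

theorem solveLoopB_eq (a b : List Int) (k : Int) (idxs : List Int)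
    (h : ∀ i ∈ idxs, (PySem.List.pyGet? b i).isSome ∧ (PySem.List.pyGet? a i).isSome) :
    ∀ lo hi,
    solveLoopB a b k idxs (some lo) (some hi) =
      (if (idxs.filterMap (solveMissF a b)).any (fun x => decide (x < 0) || decide (k < x)) then 0
       else max (highFold k (idxs.filterMap (solveSumF a b)) (idxs.filterMap (solveMissF a b)) hi
                 - lowFold (idxs.filterMap (solveSumF a b)) (idxs.filterMap (solveMissF a b)) lo + 1) 0) := by
  induction idxs with
  | nil => intro lo hi; simp [solveLoopB, lowFold, highFold]
  | cons i rest ih =>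
    intro lo hi
    obtain ⟨hb, ha⟩ := h i (List.mem_cons_self ..)
    obtain ⟨bi, hbi⟩ := Option.isSome_iff_exists.mp hb
    obtain ⟨ai, hai⟩ := Option.isSome_iff_exists.mp ha
    have hrest : ∀ i ∈ rest, (PySem.List.pyGet? b i).isSome ∧ (PySem.List.pyGet? a i).isSome :=
      fun j hj => h j (List.mem_cons_of_mem _ hj)
    have hbd : PySem.List.pyGetD b i 0 = bi := by simp [PySem.List.pyGetD, hbi]
    have had : PySem.List.pyGetD a i 0 = ai := by simp [PySem.List.pyGetD, hai]
    by_cases hmiss : bi = -1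
    · have hmf : solveMissF a b i = some ai := by simp [solveMissF, hbd, had, hmiss]
      have hsf : solveSumF a b i = none := by simp [solveSumF, hbd, hmiss]
      by_cases hval : ai < 0 ∨ k < ai
      · simp only [solveLoopB, hai, hbi, if_pos hmiss, if_pos hval, List.filterMap_cons, hmf, hsf,
          List.any_cons]
        rw [if_pos]
        simp only [Bool.or_eq_true, decide_eq_true_eq]
        left
        omega
      · simp only [solveLoopB, hai, hbi, if_pos hmiss, if_neg hval, List.filterMap_cons, hmf, hsf,
          List.any_cons, ih hrest]
        have hvb : (decide (ai < 0) || decide (k < ai)) = false := by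
          simp only [Bool.or_eq_false_iff, decide_eq_false_iff_not]
          omega
        rw [hvb]
        simp only [Bool.false_or, lowFold, highFold, List.foldl_cons]
        rw [foldl_max_seed (rest.filterMap (solveSumF a b)) lo ai,
          foldl_min_seed (rest.filterMap (solveSumF a b)) hi (ai + k)]
    · have hmf : solveMissF a b i = none := by simp [solveMissF, hbd, hmiss]
      have hsf : solveSumF a b i = some (ai + bi) := by simp [solveSumF, hbd, had, hmiss]
      simp only [solveLoopB, hai, hbi, if_neg hmiss, List.filterMap_cons, hmf, hsf, ih hrest]
      simp only [lowFold, highFold, List.foldl_cons]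

theorem solveLoopB_none_eq (a b : List Int) (k : Int) (idxs : List Int)
    (h : ∀ i ∈ idxs, (PySem.List.pyGet? b i).isSome ∧ (PySem.List.pyGet? a i).isSome)
    (hbM : ∀ x ∈ idxs.filterMap (solveMissF a b), -(10 ^ 10) ≤ x ∧ x + k ≤ 10 ^ 10)
    (hbS : ∀ s ∈ idxs.filterMap (solveSumF a b), -(10 ^ 10) ≤ s ∧ s ≤ 10 ^ 10) :
    solveLoopB a b k idxs none none =
      (if (idxs.filterMap (solveMissF a b)).any (fun x => decide (x < 0) || decide (k < x)) then 0
       else if idxs.filterMap (solveSumF a b) = [] ∧ idxs.filterMap (solveMissF a b) = [] then 1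
       else max (highFold k (idxs.filterMap (solveSumF a b)) (idxs.filterMap (solveMissF a b)) (10 ^ 10)
                 - lowFold (idxs.filterMap (solveSumF a b)) (idxs.filterMap (solveMissF a b)) (-(10 ^ 10)) + 1) 0) := by
  induction idxs with
  | nil => simp [solveLoopB]
  | cons i rest ih =>
    obtain ⟨hb, ha⟩ := h i (List.mem_cons_self ..)
    obtain ⟨bi, hbi⟩ := Option.isSome_iff_exists.mp hb
    obtain ⟨ai, hai⟩ := Option.isSome_iff_exists.mp ha
    have hrest : ∀ i ∈ rest, (PySem.List.pyGet? b i).isSome ∧ (PySem.List.pyGet? a i).isSome :=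
      fun j hj => h j (List.mem_cons_of_mem _ hj)
    have hbd : PySem.List.pyGetD b i 0 = bi := by simp [PySem.List.pyGetD, hbi]
    have had : PySem.List.pyGetD a i 0 = ai := by simp [PySem.List.pyGetD, hai]
    by_cases hmiss : bi = -1
    · have hmf : solveMissF a b i = some ai := by simp [solveMissF, hbd, had, hmiss]
      have hsf : solveSumF a b i = none := by simp [solveSumF, hbd, hmiss]
      have hmem : ai ∈ (i :: rest).filterMap (solveMissF a b) := by
        simp [List.filterMap_cons, hmf, hsf]
      obtain ⟨hai1, hai2⟩ := hbM ai hmem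
      by_cases hval : ai < 0 ∨ k < ai
      · simp only [solveLoopB, hai, hbi, if_pos hmiss, if_pos hval, List.filterMap_cons, hmf, hsf,
          List.any_cons]
        rw [if_pos]
        simp only [Bool.or_eq_true, decide_eq_true_eq]
        left
        omega
      · simp only [solveLoopB, hai, hbi, if_pos hmiss, if_neg hval, List.filterMap_cons, hmf, hsf,
          List.any_cons, solveLoopB_eq a b k rest hrest]
        have hvb : (decide (ai < 0) || decide (k < ai)) = false := by
          simp only [Bool.or_eq_false_iff, decide_eq_false_iff_not]
          omega
        rw [hvb]
        simp only [Bool.false_or]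
        rw [if_neg (by simp : ¬(List.filterMap (solveSumF a b) rest = [] ∧ ai :: List.filterMap (solveMissF a b) rest = []))]
        split_ifs with h1
        · rfl
        · simp only [lowFold, highFold, List.foldl_cons]
          rw [foldl_max_absorb (rest.filterMap (solveSumF a b)) (show -(10^10) ≤ ai by omega),
            foldl_min_absorb (rest.filterMap (solveSumF a b)) (show ai + k ≤ 10^10 by omega)]
    · have hmf : solveMissF a b i = none := by simp [solveMissF, hbd, hmiss]
      have hsf : solveSumF a b i = some (ai + bi) := by simp [solveSumF, hbd, had, hmiss]
      have hmem : ai + bi ∈ (i :: rest).filterMap (solveSumF a b) := by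
        simp [List.filterMap_cons, hmf, hsf]
      obtain ⟨hs1, hs2⟩ := hbS (ai + bi) hmem
      simp only [solveLoopB, hai, hbi, if_neg hmiss, List.filterMap_cons, hmf, hsf,
        solveLoopB_eq a b k rest hrest]
      rw [if_neg (by simp : ¬((ai + bi) :: List.filterMap (solveSumF a b) rest = [] ∧ List.filterMap (solveMissF a b) rest = []))]
      split_ifs with h1
      · rfl
      · simp only [lowFold, highFold, List.foldl_cons]
        rw [show max (-(10 ^ 10 : Int)) (ai + bi) = ai + bi from by omega,
          show min ((10 : Int) ^ 10) (ai + bi) = ai + bi from by omega]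

-- each index contributes to exactly one of the two filtered lists
theorem filterMap_split_length (a b : List Int) (idxs : List Int) :
    (idxs.filterMap (solveSumF a b)).length + (idxs.filterMap (solveMissF a b)).length
      = idxs.length := by
  induction idxs with
  | nil => simp
  | cons i rest ih =>
    by_cases hmiss : PySem.List.pyGetD b i 0 = -1
    · have hmf : solveMissF a b i = some (PySem.List.pyGetD a i 0) := by simp [solveMissF, hmiss]
      have hsf : solveSumF a b i = none := by simp [solveSumF, hmiss]
      simp only [List.filterMap_cons, hmf, hsf, List.length_cons]
      omega
    · have hmf : solveMissF a b i = none := by simp [solveMissF, hmiss]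
      have hsf : solveSumF a b i = some (PySem.List.pyGetD a i 0 + PySem.List.pyGetD b i 0) := by
        simp [solveSumF, hmiss]
      simp only [List.filterMap_cons, hmf, hsf, List.length_cons]
      omega

theorem pyGetD_bounded {l : List Int} (i : Int)
    (hl : ∀ v ∈ l, -2147483648 ≤ v ∧ v ≤ 2147483648) :
    -2147483648 ≤ PySem.List.pyGetD l i 0 ∧ PySem.List.pyGetD l i 0 ≤ 2147483648 := by
  unfold PySem.List.pyGetD
  cases hg : PySem.List.pyGet? l i with
  | none => simp
  | some v =>
    have := hl v (PySem.List.mem_of_pyGet?_eq_some l hg)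
    simpa using this

theorem dom_all_bounded {l : List Int} (hd : l.all (fun y => pvDomInt y) = true) :
    ∀ v ∈ l, -2147483648 ≤ v ∧ v ≤ 2147483648 := by
  intro v hv
  have := List.all_eq_true.mp hd v hv
  simpa [pvDomInt] using this


theorem highFold_le_mem_S (k : Int) (S M : List Int) (c s : Int) (hs : s ∈ S) :
    highFold k S M c ≤ s := by
  unfold highFold
  rw [foldl_shift_min]
  have h1 := (PySem.List.foldl_min_le M (S.foldl min c - k)).1
  have h2 := (PySem.List.foldl_min_le S c).2 s hs
  omega

theorem mem_S_le_lowFold (S M : List Int) (c s : Int) (hs : s ∈ S) :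
    s ≤ lowFold S M c := by
  unfold lowFold
  have h1 := (PySem.List.le_foldl_max M (S.foldl max c)).1
  have h2 := (PySem.List.le_foldl_max S c).2 s hs
  omega

theorem mem_M_le_lowFold (S M : List Int) (c x : Int) (hx : x ∈ M) :
    x ≤ lowFold S M c := by
  unfold lowFold
  exact (PySem.List.le_foldl_max M (S.foldl max c)).2 x hx


-- the core arithmetic comparison, over the two input-derived lists
theorem mem_neg_one_of_headI (S : List Int) (hH : S.headI = -1) : (-1 : Int) ∈ S := by
  cases S with
  | nil => simp [List.headI] at hH
  | cons u S' =>
    rw [List.headI_cons] at hH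
    subst hH
    exact List.mem_cons_self ..

theorem drop_of_head_ne (S : List Int) (hS : S ≠ []) (hH : S.headI ≠ -1) :
    S.dropWhile (fun v => v == -1) = S := by
  cases S with
  | nil => exact absurd rfl hS
  | cons u S' =>
    rw [List.headI_cons] at hH
    rw [List.dropWhile_cons, if_neg (by simpa using hH)]

theorem mem_of_drop (S : List Int) {t : Int} {r : List Int}
    (hdw : S.dropWhile (fun v => v == -1) = t :: r) : ∀ v ∈ t :: r, v ∈ S := by
  intro v hv
  rw [← hdw] at hv
  exact List.Sublist.mem hv (List.dropWhile_sublist _)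

theorem head_drop_ne (S : List Int) {t : Int} {r : List Int}
    (hdw : S.dropWhile (fun v => v == -1) = t :: r) : t ≠ -1 := by
  induction S with
  | nil => simp [List.dropWhile] at hdw
  | cons u S' ih =>
    rw [List.dropWhile_cons] at hdw
    split_ifs at hdw with h
    · exact ih hdw
    · cases hdw
      simpa using h

theorem res_core (n k : Int) (S M : List Int)
    (hSb : ∀ s ∈ S, -(2 ^ 32) ≤ s ∧ s ≤ 2 ^ 32)
    (hMb : ∀ x ∈ M, -(2 ^ 31) ≤ x ∧ x ≤ 2 ^ 31)
    (hk : -(2 ^ 31) ≤ k ∧ k ≤ 2 ^ 31)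
    (hn : M ≠ [] → (((M.length : Int) = n) ↔ S = []))
    (hD : ¬ DcoreP S M k) :
    (match scanS (-1) S with
     | none => 0
     | some s' => solveFinishA n k (M.length : Int) s' (M.foldl min (10 ^ 10)) (M.foldl max (-1)))
    =
    (if M.any (fun x => decide (x < 0) || decide (k < x)) then 0
     else if S = [] ∧ M = [] then 1
     else max (highFold k S M (10 ^ 10) - lowFold S M (-(10 ^ 10)) + 1) 0) := by
  rw [scanS_start]
  by_cases hM : M = []
  · -- no missing positions
    subst hM
    simp only [List.any_nil, Bool.false_eq_true, if_false, List.foldl_nil, and_true,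
      List.length_nil, Nat.cast_zero]
    cases hdw : S.dropWhile (fun v => v == -1) with
    | nil =>
      have hall : ∀ x ∈ S, x = (-1 : Int) := by
        intro x hx
        simpa using List.dropWhile_eq_nil_iff.mp hdw x hx
      by_cases hS : S = []
      · rw [if_pos hS]
        norm_num [solveFinishA]
      · rw [if_neg hS]
        have hhi : highFold k S [] (10 ^ 10) = -1 := by
          unfold highFold
          simp only [List.foldl_nil]
          rw [foldl_min_const S _ (-1) hall hS]
          norm_num
        have hlo : lowFold S [] (-(10 ^ 10)) = -1 := by
          unfold lowFold
          simp only [List.foldl_nil]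
          rw [foldl_max_const S _ (-1) hall hS]
          norm_num
        rw [hhi, hlo]
        norm_num [solveFinishA]
    | cons t r =>
      have hSne : S ≠ [] := by
        intro h
        rw [h] at hdw
        simp [List.dropWhile] at hdw
      rw [if_neg hSne]
      have htS : t ∈ S := mem_of_drop S hdw t (List.mem_cons_self ..)
      by_cases hne : ∀ v ∈ t :: r, v = t
      · -- consistent sums; a leading sentinel would be D1 (with M = [])
        have hH : ¬ S.headI = -1 := by
          intro hH
          exact hD ⟨Or.inr ⟨hH, by rw [hdw]; simp, by simp⟩, by rw [hdw]; simpa using hne⟩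
        have hSeq : S = t :: r := by
          have h := drop_of_head_ne S hSne hH
          rw [h] at hdw
          exact hdw
        have hallS : ∀ v ∈ S, v = t := by rw [hSeq]; exact hne
        have hanyT : ((t :: r).any fun v => decide (v ≠ t)) = false := by
          simp only [List.any_eq_false]
          intro v hv
          simpa using hne v hv
        simp only [hanyT, Bool.false_eq_true, if_false]
        have hhi : highFold k S [] (10 ^ 10) = t := by
          unfold highFold
          simp only [List.foldl_nil]
          rw [foldl_min_const S _ t hallS hSne]
          have := (hSb t htS).2
          omega
        have hlo : lowFold S [] (-(10 ^ 10)) = t := by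
          unfold lowFold
          simp only [List.foldl_nil]
          rw [foldl_max_const S _ t hallS hSne]
          have := (hSb t htS).1
          omega
        rw [hhi, hlo]
        norm_num [solveFinishA]
      · -- contradictory sums: both 0
        push_neg at hne
        obtain ⟨v, hv, hvt⟩ := hne
        have hvS : v ∈ S := mem_of_drop S hdw v hv
        have hanyT : ((t :: r).any fun v => decide (v ≠ t)) = true := by
          simp only [List.any_eq_true]
          exact ⟨v, hv, by simpa using hvt⟩
        simp only [hanyT, if_true]
        have h1 := highFold_le_mem_S k S [] (10 ^ 10) t htS
        have h2 := highFold_le_mem_S k S [] (10 ^ 10) v hvS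
        have h3 := mem_S_le_lowFold S [] (-(10 ^ 10)) t htS
        have h4 := mem_S_le_lowFold S [] (-(10 ^ 10)) v hvS
        omega
  · -- there are missing positions
    by_cases hall : ∀ x ∈ M, x ≤ -1
    · -- would be D2 whenever the sums pass A's scan: only a failing scan remains
      cases hdw : S.dropWhile (fun v => v == -1) with
      | nil =>
        exact absurd ⟨Or.inl ⟨hM, hall⟩, by rw [hdw]; simp⟩ hD
      | cons t r =>
        by_cases hne : ∀ v ∈ t :: r, v = t
        · exact absurd ⟨Or.inl ⟨hM, hall⟩, by rw [hdw]; simpa using hne⟩ hD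
        · push_neg at hne
          obtain ⟨v, hv, hvt⟩ := hne
          have hanyT : ((t :: r).any fun v => decide (v ≠ t)) = true := by
            simp only [List.any_eq_true]
            exact ⟨v, hv, by simpa using hvt⟩
          simp only [hanyT, if_true]
          obtain ⟨x0, hx0⟩ := List.exists_mem_of_ne_nil M hM
          rw [if_pos (by
            simp only [List.any_eq_true]
            exact ⟨x0, hx0, by have := hall x0 hx0; simp; omega⟩)]
    · -- some missing value exceeds -1, so A's max accumulator is live
      push_neg at hall
      obtain ⟨x0, hx0, hx0v⟩ := hall
      have hx0ge : 0 ≤ x0 := by omega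
      have hmxge : x0 ≤ M.foldl max (-1) := (PySem.List.le_foldl_max M (-1)).2 x0 hx0
      have hmxne : M.foldl max (-1) ≠ -1 := by omega
      have hmnle : M.foldl min (10 ^ 10) ≤ x0 := (PySem.List.foldl_min_le M (10 ^ 10)).2 x0 hx0
      by_cases hinv : ∃ x ∈ M, x < 0 ∨ k < x
      · -- invalid missing value: both sides 0
        obtain ⟨x1, hx1, hx1v⟩ := hinv
        rw [if_pos (by simp only [List.any_eq_true]; exact ⟨x1, hx1, by simp; omega⟩)]
        have hmx1 : x1 ≤ M.foldl max (-1) := (PySem.List.le_foldl_max M (-1)).2 x1 hx1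
        have hmn1 : M.foldl min (10 ^ 10) ≤ x1 := (PySem.List.foldl_min_le M (10 ^ 10)).2 x1 hx1
        cases hdw : S.dropWhile (fun v => v == -1) with
        | nil =>
          show solveFinishA n k (M.length : Int) (-1) (M.foldl min (10 ^ 10)) (M.foldl max (-1)) = 0
          simp only [solveFinishA, if_neg hmxne]
          rw [if_neg (by omega)]
        | cons t r =>
          by_cases hne : ∀ v ∈ t :: r, v = t
          · have hanyT : ((t :: r).any fun v => decide (v ≠ t)) = false := by
              simp only [List.any_eq_false]
              intro v hv
              simpa using hne v hv
            simp only [hanyT, Bool.false_eq_true, if_false]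
            simp only [solveFinishA, if_neg hmxne]
            rw [if_neg (by omega)]
          · push_neg at hne
            obtain ⟨v, hv, hvt⟩ := hne
            have hanyT : ((t :: r).any fun v => decide (v ≠ t)) = true := by
              simp only [List.any_eq_true]
              exact ⟨v, hv, by simpa using hvt⟩
            simp only [hanyT, if_true]
      · -- all missing values valid: the live comparison
        push_neg at hinv
        have hvalid : ∀ x ∈ M, 0 ≤ x ∧ x ≤ k := by
          intro x hx
          have := hinv x hx
          omega
        have hkge : 0 ≤ k := by have := hvalid x0 hx0; omega
        have hmnge : 0 ≤ M.foldl min (10 ^ 10) :=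
          le_foldl_min M (by norm_num) (fun x hx => (hvalid x hx).1)
        have hmxle : M.foldl max (-1) ≤ k :=
          foldl_max_le M (by omega) (fun x hx => (hvalid x hx).2)
        have hR1 : M.foldl max (-1 : Int) = max (M.foldl max (-(10 ^ 10))) (-1) :=
          foldl_max_absorb M (by norm_num)
        have hWge : x0 ≤ M.foldl max (-(10 ^ 10)) := (PySem.List.le_foldl_max M _).2 x0 hx0
        rw [if_neg (by
          simp only [List.any_eq_true, not_exists]
          push_neg
          intro x hx
          have := hvalid x hx
          simp
          omega : ¬(M.any fun x => decide (x < 0) || decide (k < x)) = true),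
          if_neg (fun h => hM h.2)]
        cases hdw : S.dropWhile (fun v => v == -1) with
        | nil =>
          have hallS : ∀ x ∈ S, x = (-1 : Int) := by
            intro x hx
            simpa using List.dropWhile_eq_nil_iff.mp hdw x hx
          by_cases hS : S = []
          · -- every position missing: the counting branch
            subst hS
            have hcm : (M.length : Int) = n := (hn hM).mpr rfl
            show solveFinishA n k (M.length : Int) (-1) (M.foldl min (10 ^ 10)) (M.foldl max (-1))
              = max (highFold k [] M (10 ^ 10) - lowFold [] M (-(10 ^ 10)) + 1) 0
            have hhi : highFold k [] M (10 ^ 10) = min (M.foldl min (10 ^ 10)) (10 ^ 10 - k) + k := by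
              unfold highFold
              simp only [List.foldl_nil]
              rw [foldl_shift_min, foldl_min_absorb M (show (10 : Int) ^ 10 - k ≤ 10 ^ 10 by omega)]
            have hlo : lowFold [] M (-(10 ^ 10)) = M.foldl max (-(10 ^ 10)) := by
              unfold lowFold
              simp
            rw [hhi, hlo]
            simp only [solveFinishA, if_neg hmxne, if_pos hcm]
            rw [if_pos (by omega)]
            omega
          · -- sums all -1 but a live missing max: both 0
            have hcm : ¬(M.length : Int) = n := fun h => hS ((hn hM).mp h)
            obtain ⟨u, hu⟩ := List.exists_mem_of_ne_nil S hS
            have hu1 : u = -1 := hallS u hu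
            subst hu1
            have h1 := highFold_le_mem_S k S M (10 ^ 10) (-1) hu
            have h2 := mem_M_le_lowFold S M (-(10 ^ 10)) x0 hx0
            show solveFinishA n k (M.length : Int) (-1) (M.foldl min (10 ^ 10)) (M.foldl max (-1))
              = max (highFold k S M (10 ^ 10) - lowFold S M (-(10 ^ 10)) + 1) 0
            simp only [solveFinishA, if_neg hmxne]
            rw [if_pos (by omega), if_neg hcm, if_neg (by omega)]
            omega
        | cons t r =>
          have hSne : S ≠ [] := by
            intro h
            rw [h] at hdw
            simp [List.dropWhile] at hdw
          have hcm : ¬(M.length : Int) = n := fun h => hSne ((hn hM).mp h)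
          have htS : t ∈ S := mem_of_drop S hdw t (List.mem_cons_self ..)
          have htne : t ≠ -1 := head_drop_ne S hdw
          by_cases hne : ∀ v ∈ t :: r, v = t
          · have hanyT : ((t :: r).any fun v => decide (v ≠ t)) = false := by
              simp only [List.any_eq_false]
              intro v hv
              simpa using hne v hv
            simp only [hanyT, Bool.false_eq_true, if_false]
            by_cases hH : S.headI = -1
            case neg =>
              -- no leading sentinel: genuine comparison
              have hSeq : S = t :: r := by
                have h := drop_of_head_ne S hSne hH
                rw [h] at hdw
                exact hdw
              have hallS : ∀ v ∈ S, v = t := by rw [hSeq]; exact hne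
              have hhi : highFold k S M (10 ^ 10) = min (M.foldl min (10 ^ 10)) (t - k) + k := by
                unfold highFold
                rw [foldl_min_const S _ t hallS hSne,
                  show min ((10 : Int) ^ 10) t = t from by have := (hSb t htS).2; omega,
                  foldl_shift_min,
                  foldl_min_absorb M (show t - k ≤ (10 : Int) ^ 10 from by
                    have := (hSb t htS).2; omega)]
              have hlo : lowFold S M (-(10 ^ 10)) = max (M.foldl max (-(10 ^ 10))) t := by
                unfold lowFold
                rw [foldl_max_const S _ t hallS hSne,
                  show max (-(10 : Int) ^ 10) t = t from by have := (hSb t htS).1; omega,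
                  foldl_max_absorb M (show -(10 : Int) ^ 10 ≤ t from by
                    have := (hSb t htS).1; omega)]
              rw [hhi, hlo]
              simp only [solveFinishA, if_neg hmxne]
              rw [if_pos (by omega), if_neg hcm]
              split_ifs with hrange <;> omega
            case pos =>
              -- leading sentinel with a consistent tail: D1 unless the range fails
              have hnd1 : ¬(∀ x ∈ M, 0 ≤ x ∧ x ≤ k ∧ x ≤ t ∧ t ≤ x + k) := by
                intro hc
                exact hD ⟨Or.inr ⟨hH, by rw [hdw]; simp, by rw [hdw]; simpa using hc⟩,
                  by rw [hdw]; simpa using hne⟩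
              have hx1ex : ∃ x ∈ M, t < x ∨ x + k < t := by
                by_contra hno
                push_neg at hno
                exact hnd1 (fun x hx => by
                  have h1 := hvalid x hx
                  have h2 := hno x hx
                  exact ⟨h1.1, h1.2, by omega, by omega⟩)
              obtain ⟨x1, hx1, hx1v⟩ := hx1ex
              have hmx1 : x1 ≤ M.foldl max (-1) := (PySem.List.le_foldl_max M (-1)).2 x1 hx1
              have hmn1 : M.foldl min (10 ^ 10) ≤ x1 := (PySem.List.foldl_min_le M (10 ^ 10)).2 x1 hx1
              have hneg1 : (-1 : Int) ∈ S := mem_neg_one_of_headI S hH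
              have h1 := highFold_le_mem_S k S M (10 ^ 10) (-1) hneg1
              have h2 := mem_M_le_lowFold S M (-(10 ^ 10)) x0 hx0
              simp only [solveFinishA, if_neg hmxne]
              rw [if_pos (by omega), if_neg hcm, if_neg (by omega)]
              omega
          · -- contradictory sums: both 0
            push_neg at hne
            obtain ⟨v, hv, hvt⟩ := hne
            have hvS : v ∈ S := mem_of_drop S hdw v hv
            have hanyT : ((t :: r).any fun v => decide (v ≠ t)) = true := by
              simp only [List.any_eq_true]
              exact ⟨v, hv, by simpa using hvt⟩
            simp only [hanyT, if_true]
            have h1 := highFold_le_mem_S k S M (10 ^ 10) t htS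
            have h2 := highFold_le_mem_S k S M (10 ^ 10) v hvS
            have h3 := mem_S_le_lowFold S M (-(10 ^ 10)) t htS
            have h4 := mem_S_le_lowFold S M (-(10 ^ 10)) v hvS
            omega

theorem res_core_D (n k : Int) (S M : List Int)
    (hSb : ∀ s ∈ S, -(2 ^ 32) ≤ s ∧ s ≤ 2 ^ 32)
    (hMb : ∀ x ∈ M, -(2 ^ 31) ≤ x ∧ x ≤ 2 ^ 31)
    (hk : -(2 ^ 31) ≤ k ∧ k ≤ 2 ^ 31)
    (hn : M ≠ [] → (((M.length : Int) = n) ↔ S = []))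
    (hD : DcoreP S M k) :
    (match scanS (-1) S with
     | none => 0
     | some s' => solveFinishA n k (M.length : Int) s' (M.foldl min (10 ^ 10)) (M.foldl max (-1))) = 1
    ∧
    (if M.any (fun x => decide (x < 0) || decide (k < x)) then 0
     else if S = [] ∧ M = [] then 1
     else max (highFold k S M (10 ^ 10) - lowFold S M (-(10 ^ 10)) + 1) 0) = 0 := by
  rw [scanS_start]
  obtain ⟨hor, heq⟩ := hD
  cases hor with
  | inr hD1 =>
    obtain ⟨hH, hT, hvr0⟩ := hD1
    cases hdw : S.dropWhile (fun v => v == -1) with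
    | nil => exact absurd hdw hT
    | cons t r =>
      rw [hdw] at heq hvr0
      simp only [List.headI_cons] at heq hvr0
      have hcons : ∀ v ∈ t :: r, v = t := heq
      have hSne : S ≠ [] := by
        intro h
        rw [h] at hdw
        simp [List.dropWhile] at hdw
      have htS : t ∈ S := mem_of_drop S hdw t (List.mem_cons_self ..)
      have htne : t ≠ -1 := head_drop_ne S hdw
      have hneg1 : (-1 : Int) ∈ S := mem_neg_one_of_headI S hH
      have hanyT : ((t :: r).any fun v => decide (v ≠ t)) = false := by
        simp only [List.any_eq_false]
        intro v hv
        simpa using hcons v hv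
      simp only [hanyT, Bool.false_eq_true, if_false]
      constructor
      · -- A returns 1
        cases hMc : M with
        | nil =>
          subst hMc
          norm_num [solveFinishA]
        | cons y M' =>
          have hM : M ≠ [] := by rw [hMc]; simp
          rw [← hMc]
          have hvr : ∀ x ∈ M, (0 ≤ x ∧ x ≤ k) ∧ x ≤ t ∧ t ≤ x + k := by
            intro x hx
            have hx' := hvr0 x hx
            exact ⟨⟨hx'.1, hx'.2.1⟩, hx'.2.2.1, hx'.2.2.2⟩
          have hy : y ∈ M := by rw [hMc]; exact List.mem_cons_self ..
          have hy0 : 0 ≤ y := ((hvr y hy).1).1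
          have hmxy : y ≤ M.foldl max (-1) := (PySem.List.le_foldl_max M (-1)).2 y hy
          have hmxne : M.foldl max (-1) ≠ -1 := by omega
          have hmny : M.foldl min (10 ^ 10) ≤ y := (PySem.List.foldl_min_le M (10 ^ 10)).2 y hy
          have hyk : y ≤ k := ((hvr y hy).1).2
          have hyt : y ≤ t := ((hvr y hy).2).1
          have hmnge : 0 ≤ M.foldl min (10 ^ 10) :=
            le_foldl_min M (by norm_num) (fun x hx => ((hvr x hx).1).1)
          have hmxle : M.foldl max (-1) ≤ k :=
            foldl_max_le M (by omega) (fun x hx => ((hvr x hx).1).2)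
          have hmxt : M.foldl max (-1) ≤ t :=
            foldl_max_le M (by omega) (fun x hx => ((hvr x hx).2).1)
          have hmnt : t - k ≤ M.foldl min (10 ^ 10) :=
            le_foldl_min M (by have := (hSb t htS).2; omega)
              (fun x hx => by have := ((hvr x hx).2).2; omega)
          have hcm : ¬(M.length : Int) = n := fun h => hSne ((hn hM).mp h)
          simp only [solveFinishA, if_neg hmxne]
          rw [if_pos (by omega), if_neg hcm, if_pos (by omega)]
      · -- B returns 0
        by_cases hA : (M.any fun x => decide (x < 0) || decide (k < x)) = true
        · rw [if_pos hA]
        · rw [if_neg hA, if_neg (fun h => hSne h.1)]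
          have h1 := highFold_le_mem_S k S M (10 ^ 10) (-1) hneg1
          have h2 := highFold_le_mem_S k S M (10 ^ 10) t htS
          have h3 := mem_S_le_lowFold S M (-(10 ^ 10)) (-1) hneg1
          have h4 := mem_S_le_lowFold S M (-(10 ^ 10)) t htS
          omega
  | inl hD2 =>
    obtain ⟨hM, hall⟩ := hD2
    have hmx : M.foldl max (-1 : Int) = -1 := by
      have h1 := (PySem.List.le_foldl_max M (-1 : Int)).1
      have h2 := foldl_max_le M (le_refl (-1 : Int)) hall
      omega
    constructor
    · -- A returns 1 (its max accumulator still reads -1)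
      cases hdw : S.dropWhile (fun v => v == -1) with
      | nil =>
        show solveFinishA n k (M.length : Int) (-1) (M.foldl min (10 ^ 10)) (M.foldl max (-1)) = 1
        norm_num [solveFinishA, hmx]
      | cons t r =>
        have hcons : ∀ v ∈ t :: r, v = t := by
          rw [hdw] at heq
          simpa using heq
        have hanyT : ((t :: r).any fun v => decide (v ≠ t)) = false := by
          simp only [List.any_eq_false]
          intro v hv
          simpa using hcons v hv
        simp only [hanyT, Bool.false_eq_true, if_false]
        norm_num [solveFinishA, hmx]
    · -- B returns 0 (the first missing value is invalid)
      obtain ⟨x0, hx0⟩ := List.exists_mem_of_ne_nil M hM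
      rw [if_pos (by
        simp only [List.any_eq_true]
        exact ⟨x0, hx0, by have := hall x0 hx0; simp; omega⟩)]

-- assembling: both ports reduced to the core forms
theorem mem_missVals_bounded (a b : List Int) (n : Int)
    (ha : ∀ v ∈ a, -2147483648 ≤ v ∧ v ≤ 2147483648) :
    ∀ x ∈ missVals a b n, -(2 ^ 31) ≤ x ∧ x ≤ 2 ^ 31 := by
  intro x hx
  obtain ⟨i, _, hi⟩ := List.mem_filterMap.mp hx
  unfold solveMissF at hi
  split_ifs at hi
  have hb := pyGetD_bounded (l := a) i ha
  cases hi
  constructor <;> omega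

theorem mem_knownSums_bounded (a b : List Int) (n : Int)
    (ha : ∀ v ∈ a, -2147483648 ≤ v ∧ v ≤ 2147483648)
    (hb : ∀ v ∈ b, -2147483648 ≤ v ∧ v ≤ 2147483648) :
    ∀ s ∈ knownSums a b n, -(2 ^ 32) ≤ s ∧ s ≤ 2 ^ 32 := by
  intro s hs
  obtain ⟨i, _, hi⟩ := List.mem_filterMap.mp hs
  unfold solveSumF at hi
  split_ifs at hi
  have hba := pyGetD_bounded (l := a) i ha
  have hbb := pyGetD_bounded (l := b) i hb
  cases hi
  constructor <;> omega

theorem dom_parts (a b : List Int) (n k : Int) (hd : Dom_solve a b n k) :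
    (∀ v ∈ a, -2147483648 ≤ v ∧ v ≤ 2147483648)
    ∧ (∀ v ∈ b, -2147483648 ≤ v ∧ v ≤ 2147483648)
    ∧ (-2147483648 ≤ k ∧ k ≤ 2147483648) := by
  unfold Dom_solve at hd
  simp only [Bool.and_eq_true] at hd
  obtain ⟨⟨⟨ha, hb⟩, _⟩, hk⟩ := hd
  refine ⟨dom_all_bounded ha, dom_all_bounded hb, ?_⟩
  simpa [pvDomInt] using hk

theorem pre_range_some (a b : List Int) (n k : Int) (hp : Pre_solve a b n k) :
    ∀ i ∈ PySem.List.pyRange 0 n 1,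
      (PySem.List.pyGet? b i).isSome ∧ (PySem.List.pyGet? a i).isSome := by
  obtain ⟨hna, hnb⟩ := hp
  intro i hi
  rw [PySem.List.mem_pyRange_one] at hi
  exact ⟨pyGet?_isSome_of_lt hi.1 (by omega), pyGet?_isSome_of_lt hi.1 (by omega)⟩

theorem ports_reduced (a b : List Int) (n k : Int)
    (hd : Dom_solve a b n k) (hp : Pre_solve a b n k) :
    solve a b n k =
      (match scanS (-1) (knownSums a b n) with
       | none => 0
       | some s' => solveFinishA n k ((missVals a b n).length : Int) s'
           ((missVals a b n).foldl min (10 ^ 10)) ((missVals a b n).foldl max (-1)))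
    ∧ solve_alt a b n k =
      (if (missVals a b n).any (fun x => decide (x < 0) || decide (k < x)) then 0
       else if knownSums a b n = [] ∧ missVals a b n = [] then 1
       else max (highFold k (knownSums a b n) (missVals a b n) (10 ^ 10)
                 - lowFold (knownSums a b n) (missVals a b n) (-(10 ^ 10)) + 1) 0) := by
  have hr := pre_range_some a b n k hp
  obtain ⟨ha, hb, hk⟩ := dom_parts a b n k hd
  constructor
  · unfold solve
    rw [solveLoopA_eq a b n k _ hr]
    unfold knownSums missVals
    cases scanS (-1) ((PySem.List.pyRange 0 n 1).filterMap (solveSumF a b)) with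
    | none => rfl
    | some s' =>
      simp only
      norm_num
  · unfold solve_alt
    rw [solveLoopB_none_eq a b k _ hr]
    · rfl
    · intro x hx
      have := mem_missVals_bounded a b n ha x (by exact hx)
      constructor <;> omega
    · intro s hs
      have := mem_knownSums_bounded a b n ha hb s (by exact hs)
      constructor <;> omega

theorem counts_fact (a b : List Int) (n k : Int) (hp : Pre_solve a b n k) :
    missVals a b n ≠ [] → (((missVals a b n).length : Int) = n ↔ knownSums a b n = []) := by
  intro hM
  have hsplit := filterMap_split_length a b (PySem.List.pyRange 0 n 1)
  have hlen : (PySem.List.pyRange 0 n 1).length = (n - 0).toNat :=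
    PySem.List.length_pyRange_one 0 n
  unfold knownSums missVals at *
  have hMlen : 0 < ((PySem.List.pyRange 0 n 1).filterMap (solveMissF a b)).length :=
    List.length_pos_iff.mpr hM
  have hn : 0 ≤ n := by omega
  rw [← List.length_eq_zero_iff]
  omega

theorem bounds_fact (a b : List Int) (n k : Int) (hd : Dom_solve a b n k) :
    (∀ s ∈ knownSums a b n, -(2 ^ 32) ≤ s ∧ s ≤ 2 ^ 32)
    ∧ (∀ x ∈ missVals a b n, -(2 ^ 31) ≤ x ∧ x ≤ 2 ^ 31)
    ∧ (-(2 ^ 31) ≤ k ∧ k ≤ 2 ^ 31) := by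
  obtain ⟨ha, hb, hk⟩ := dom_parts a b n k hd
  exact ⟨mem_knownSums_bounded a b n ha hb, mem_missVals_bounded a b n ha, by omega⟩

theorem nat_bridge (a b : List Int) (m : Nat) (hma : m ≤ a.length) (hmb : m ≤ b.length) :
    (PySem.List.pyRange 0 (m : Int) 1).filterMap (solveMissF a b)
      = ((a.zip b).take m).filterMap (fun p => if p.2 = -1 then some p.1 else none)
    ∧ (PySem.List.pyRange 0 (m : Int) 1).filterMap (solveSumF a b)
      = ((a.zip b).take m).filterMap (fun p => if p.2 = -1 then none else some (p.1 + p.2)) := by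
  induction m with
  | zero => simp [PySem.List.pyRange_one_eq_nil]
  | succ m ih =>
    obtain ⟨ih1, ih2⟩ := ih (by omega) (by omega)
    have hrange : PySem.List.pyRange 0 ((m + 1 : Nat) : Int) 1
        = PySem.List.pyRange 0 (m : Int) 1 ++ [(m : Int)] := by
      push_cast
      exact PySem.List.pyRange_one_succ_right (by positivity)
    have hm' : m < (a.zip b).length := by
      rw [List.length_zip]
      omega
    have htake : (a.zip b).take (m + 1)
        = (a.zip b).take m ++ [(a[m]'(by omega), b[m]'(by omega))] := by
      rw [List.take_succ, List.getElem?_eq_getElem hm']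
      simp [List.getElem_zip]
    have hga : PySem.List.pyGetD a (m : Int) 0 = a[m]'(by omega) := by
      rw [PySem.List.pyGetD_natCast]
      simp [List.getD, List.getElem?_eq_getElem (show m < a.length by omega)]
    have hgb : PySem.List.pyGetD b (m : Int) 0 = b[m]'(by omega) := by
      rw [PySem.List.pyGetD_natCast]
      simp [List.getD, List.getElem?_eq_getElem (show m < b.length by omega)]
    rw [hrange, htake]
    simp only [List.filterMap_append, ih1, ih2]
    constructor
    · simp only [List.filterMap_cons, List.filterMap_nil, solveMissF, hga, hgb]
    · simp only [List.filterMap_cons, List.filterMap_nil, solveSumF, hga, hgb]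
      split_ifs <;> simp_all

theorem bridge_lists (a b : List Int) (n : Int)
    (hna : n ≤ (a.length : Int)) (hnb : n ≤ (b.length : Int)) :
    missVals a b n = ((a.zip b).take n.toNat).filterMap (fun p => if p.2 = -1 then some p.1 else none)
    ∧ knownSums a b n = ((a.zip b).take n.toNat).filterMap (fun p => if p.2 = -1 then none else some (p.1 + p.2)) := by
  unfold missVals knownSums
  by_cases hn0 : 0 ≤ n
  · obtain ⟨m, rfl⟩ : ∃ m : Nat, n = (m : Int) := ⟨n.toNat, by omega⟩
    simpa using nat_bridge a b m (by omega) (by omega)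
  · rw [PySem.List.pyRange_one_eq_nil (by omega), show n.toNat = 0 by omega]
    simp

theorem D_transport (a b : List Int) (n k : Int) (hp : Pre_solve a b n k) :
    D_solve a b n k ↔ DcoreP (knownSums a b n) (missVals a b n) k := by
  obtain ⟨hna, hnb⟩ := hp
  obtain ⟨hm, hs⟩ := bridge_lists a b n hna hnb
  have h1 : D_solve a b n k = DcoreP
      (((a.zip b).take n.toNat).filterMap fun p => if p.2 = -1 then none else some (p.1 + p.2))
      (((a.zip b).take n.toNat).filterMap fun p => if p.2 = -1 then some p.1 else none) k := rfl
  rw [h1, ← hs, ← hm]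

-- ===== VERDICT =====
theorem solve_spec : Claim_unchanged_solve := by
  intro a b n k hd hp hD
  obtain ⟨hA, hB⟩ := ports_reduced a b n k hd hp
  obtain ⟨h1, h2, h3⟩ := bounds_fact a b n k hd
  rw [hA, hB]
  exact res_core n k _ _ h1 h2 h3 (counts_fact a b n k hp)
    (fun hc => hD ((D_transport a b n k hp).mpr hc))

theorem solve_changed : Claim_changed_solve := by
  unfold Claim_changed_solve; decide

theorem solve_tight : Claim_exact_solve := by
  intro a b n k hd hp hD
  obtain ⟨hA, hB⟩ := ports_reduced a b n k hd hp
  obtain ⟨h1, h2, h3⟩ := bounds_fact a b n k hd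
  rw [hA, hB]
  obtain ⟨e1, e2⟩ := res_core_D n k _ _ h1 h2 h3 (counts_fact a b n k hp)
    ((D_transport a b n k hp).mp hD)
  rw [e1, e2]
  decide
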